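-- pv_equiv track=rewrite | github.com/devops-stack/ring-0 | kernel_ai/services/crypto_security.py | infer_crypto_protocol
-- ===== SOURCE A (Python) =====
-- def infer_crypto_protocol(local_port, remote_port, process_name):
--     """Infer protocol/algorithm pair from ports and process hints."""
--     ports = {int(local_port or 0), int(remote_port or 0)}
--     p_name = (process_name or "").lower()
--     if 22 in ports or "ssh" in p_name:
--         return "SSH", "Curve25519/ChaCha20-Poly1305"
--     if 51820 in ports or "wireguard" in p_name or p_name.startswith("wg"):
--         return "WireGuard", "ChaCha20-Poly1305"
--     tls_ports = {443, 465, 636, 853, 993, 995, 8443, 9443, 6443, 2376}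
--     if ports & tls_ports or any(x in p_name for x in ["nginx", "haproxy", "curl", "wget", "openssl", "stunnel", "traefik"]):
--         return "TLS", "AES-GCM/SHA256"
--     return "Crypto API", "AES/SHA"
-- ===== SOURCE B (Python) =====
-- _PORT_PRIORITY = {22: 0, 51820: 1, 443: 2, 465: 2, 636: 2, 853: 2, 993: 2,
--                   995: 2, 8443: 2, 9443: 2, 6443: 2, 2376: 2}
-- _NAME_RULES = [("ssh", 0), ("wireguard", 1), ("nginx", 2), ("haproxy", 2),
--                ("curl", 2), ("wget", 2), ("openssl", 2), ("stunnel", 2),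
--                ("traefik", 2)]
-- _RESULTS = [("SSH", "Curve25519/ChaCha20-Poly1305"),
--             ("WireGuard", "ChaCha20-Poly1305"),
--             ("TLS", "AES-GCM/SHA256"),
--             ("Crypto API", "AES/SHA")]
--
--
-- def infer_crypto_protocol(local_port, remote_port, process_name):
--     """Infer protocol/algorithm pair from ports and process hints."""
--     p_name = (process_name or "").lower()
--     p_prio = min(_PORT_PRIORITY.get(int(local_port or 0), 3),
--                  _PORT_PRIORITY.get(int(remote_port or 0), 3))
--     n_prio = next((pr for key, pr in _NAME_RULES if key in p_name), 3)
--     if p_name.startswith("wg"):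
--         n_prio = min(n_prio, 1)
--     return _RESULTS[min(p_prio, n_prio)]
-- ===== Notes on version B (the rewrite author's own statement) =====
-- stated objective: alternative
-- what changed: Replaced the inline if-cascade with precomputed priority tables: a port->priority dict, an ordered keyword rule list scanned for the first match, and a results array indexed by the minimum priority.
import Mathlib
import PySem

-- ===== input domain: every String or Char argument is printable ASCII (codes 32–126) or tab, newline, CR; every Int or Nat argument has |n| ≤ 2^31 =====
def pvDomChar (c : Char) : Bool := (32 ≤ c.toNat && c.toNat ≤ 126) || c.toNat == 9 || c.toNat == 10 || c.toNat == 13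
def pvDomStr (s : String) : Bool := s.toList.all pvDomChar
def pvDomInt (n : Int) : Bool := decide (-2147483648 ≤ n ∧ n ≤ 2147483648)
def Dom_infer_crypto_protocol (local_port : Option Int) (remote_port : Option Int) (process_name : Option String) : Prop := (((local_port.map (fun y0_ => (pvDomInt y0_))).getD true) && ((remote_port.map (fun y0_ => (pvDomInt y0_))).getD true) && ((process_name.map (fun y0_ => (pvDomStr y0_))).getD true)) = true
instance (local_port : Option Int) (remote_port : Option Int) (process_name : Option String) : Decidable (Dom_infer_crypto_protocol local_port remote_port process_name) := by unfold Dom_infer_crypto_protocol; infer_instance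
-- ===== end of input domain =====

-- B replaces A's if-cascade by priority tables (port->priority dict, ordered keyword rules,
-- results array indexed by the minimum priority); alternative decomposition, same cost.


-- ===== PORT A =====
def infer_crypto_protocol (local_port : Option Int) (remote_port : Option Int) (process_name : Option String) : String × String :=
  let ports : PySem.Set Int := PySem.Set.ofList [local_port.getD 0, remote_port.getD 0]
  let p_name := PySem.Str.lower (process_name.getD "")
  if PySem.Set.contains ports 22 || PySem.Str.isIn "ssh" p_name then
    ("SSH", "Curve25519/ChaCha20-Poly1305")
  else if PySem.Set.contains ports 51820 || PySem.Str.isIn "wireguard" p_name || PySem.Str.startswith p_name "wg" then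
    ("WireGuard", "ChaCha20-Poly1305")
  else
    let tls_ports : PySem.Set Int := PySem.Set.ofList [443, 465, 636, 853, 993, 995, 8443, 9443, 6443, 2376]
    if !(PySem.Set.inter ports tls_ports).isEmpty
        || (["nginx", "haproxy", "curl", "wget", "openssl", "stunnel", "traefik"].any (fun x => PySem.Str.isIn x p_name)) then
      ("TLS", "AES-GCM/SHA256")
    else
      ("Crypto API", "AES/SHA")

-- ===== PORT B =====
def pvPortPriority : PySem.Dict Int Int :=
  PySem.Dict.ofList [(22, 0), (51820, 1), (443, 2), (465, 2), (636, 2), (853, 2), (993, 2),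
                     (995, 2), (8443, 2), (9443, 2), (6443, 2), (2376, 2)]

def pvNameRules : List (String × Int) :=
  [("ssh", 0), ("wireguard", 1), ("nginx", 2), ("haproxy", 2),
   ("curl", 2), ("wget", 2), ("openssl", 2), ("stunnel", 2), ("traefik", 2)]

def pvResults : List (String × String) :=
  [("SSH", "Curve25519/ChaCha20-Poly1305"),
   ("WireGuard", "ChaCha20-Poly1305"),
   ("TLS", "AES-GCM/SHA256"),
   ("Crypto API", "AES/SHA")]

-- next((pr for key, pr in _NAME_RULES if key in p_name), 3): first matching rule's priority
def pvFirstMatch : List (String × Int) → String → Int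
  | [], _ => 3
  | kv :: rest, nm => if PySem.Str.isIn kv.1 nm then kv.2 else pvFirstMatch rest nm

def infer_crypto_protocol_alt (local_port : Option Int) (remote_port : Option Int) (process_name : Option String) : String × String :=
  let p_name := PySem.Str.lower (process_name.getD "")
  let p_prio := min (pvPortPriority.getD (local_port.getD 0) 3) (pvPortPriority.getD (remote_port.getD 0) 3)
  let n_prio := pvFirstMatch pvNameRules p_name
  let n_prio := if PySem.Str.startswith p_name "wg" then min n_prio 1 else n_prio
  PySem.List.pyGetD pvResults (min p_prio n_prio) ("", "")

-- ===== PRECONDITION & SPEC =====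
def Spec_infer_crypto_protocol (local_port : Option Int) (remote_port : Option Int) (process_name : Option String) (out : String × String) : Prop := out = infer_crypto_protocol_alt local_port remote_port process_name
instance (local_port : Option Int) (remote_port : Option Int) (process_name : Option String) (out : String × String) : Decidable (Spec_infer_crypto_protocol local_port remote_port process_name out) := by unfold Spec_infer_crypto_protocol; infer_instance

-- ===== CLAIM (what is proved, stated in full; the proofs are below) =====
def Claim_equal_infer_crypto_protocol : Prop := ∀ (local_port : Option Int) (remote_port : Option Int) (process_name : Option String), Dom_infer_crypto_protocol local_port remote_port process_name → Spec_infer_crypto_protocol local_port remote_port process_name (infer_crypto_protocol local_port remote_port process_name)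

-- ===== LEMMAS AND PROOFS =====

-- the 10 TLS ports, as a plain list (proof-side vocabulary)
def pvTlsL : List Int := [443, 465, 636, 853, 993, 995, 8443, 9443, 6443, 2376]

-- conditional characterisation of the port-priority dict lookup
def pvPrio (p : Int) : Int :=
  if p = 22 then 0 else if p = 51820 then 1 else if p ∈ pvTlsL then 2 else 3

lemma getD_eq_pvPrio (p : Int) : pvPortPriority.getD p 3 = pvPrio p := by
  by_cases h1 : p = 22
  · subst h1; decide
  by_cases h2 : p = 51820
  · subst h2; decide
  by_cases h3 : p ∈ pvTlsL
  · simp only [pvPrio, h1, h2, h3, if_false, if_true]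
    simp only [pvTlsL, List.mem_cons, List.not_mem_nil, or_false] at h3
    rcases h3 with rfl | rfl | rfl | rfl | rfl | rfl | rfl | rfl | rfl | rfl <;> decide
  · have hc : pvPortPriority.contains p = false := by
      rw [PySem.Dict.contains_eq_decide_mem_keys]
      have hk : pvPortPriority.keys = [22, 51820, 443, 465, 636, 853, 993, 995, 8443, 9443, 6443, 2376] := by decide
      rw [hk]
      simp only [pvTlsL, List.mem_cons, List.not_mem_nil, or_false] at h3 ⊢
      simp [h1, h2]; tauto
    rw [PySem.Dict.getD_of_not_contains _ _ hc]
    simp [pvPrio, h1, h2, h3]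

lemma minP (x y : Int) : min (pvPrio x) (pvPrio y) =
    if x = 22 ∨ y = 22 then 0 else if x = 51820 ∨ y = 51820 then 1 else
    if x ∈ pvTlsL ∨ y ∈ pvTlsL then 2 else 3 := by
  unfold pvPrio
  split_ifs <;> first | rfl | omega | tauto

lemma contains_pair (x y z : Int) :
    PySem.Set.contains (PySem.Set.ofList [x, y]) z = decide (x = z ∨ y = z) := by
  by_cases h : x = z ∨ y = z
  · simp only [h, decide_true]
    rw [PySem.Set.contains_iff, PySem.Set.mem_ofList]
    simp only [List.mem_cons, List.not_mem_nil, or_false]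
    rcases h with h | h <;> simp [h]
  · simp only [h, decide_false]
    rw [Bool.eq_false_iff, Ne, PySem.Set.contains_iff, PySem.Set.mem_ofList]
    simp only [List.mem_cons, List.not_mem_nil, or_false]
    intro hz
    exact h (by rcases hz with hz | hz <;> [exact Or.inl hz.symm; exact Or.inr hz.symm])

lemma inter_pair (x y : Int) :
    (!(PySem.Set.inter (PySem.Set.ofList [x, y]) (PySem.Set.ofList pvTlsL)).isEmpty)
      = decide (x ∈ pvTlsL ∨ y ∈ pvTlsL) := by
  by_cases h : x ∈ pvTlsL ∨ y ∈ pvTlsL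
  · simp only [h, decide_true, Bool.not_eq_true']
    rw [Bool.eq_false_iff, Ne, List.isEmpty_iff]
    intro hnil
    rcases h with h | h
    · have : x ∈ PySem.Set.inter (PySem.Set.ofList [x, y]) (PySem.Set.ofList pvTlsL) := by
        rw [PySem.Set.mem_inter]; constructor <;> rw [PySem.Set.mem_ofList] <;> simp [h]
      rw [hnil] at this; simp at this
    · have : y ∈ PySem.Set.inter (PySem.Set.ofList [x, y]) (PySem.Set.ofList pvTlsL) := by
        rw [PySem.Set.mem_inter]; constructor <;> rw [PySem.Set.mem_ofList] <;> simp [h]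
      rw [hnil] at this; simp at this
  · simp only [h, decide_false, Bool.not_eq_false', List.isEmpty_iff]
    rw [List.eq_nil_iff_forall_not_mem]
    intro z hz
    rw [PySem.Set.mem_inter, PySem.Set.mem_ofList, PySem.Set.mem_ofList] at hz
    rcases hz with ⟨hz1, hz2⟩
    apply h
    simp only [List.mem_cons, List.not_mem_nil, or_false] at hz1
    rcases hz1 with hz1 | hz1
    · left; rwa [← hz1]
    · right; rwa [← hz1]

lemma key_lemma (lp rp : Option Int) (pn : Option String) :
    infer_crypto_protocol lp rp pn = infer_crypto_protocol_alt lp rp pn := by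
  simp only [infer_crypto_protocol, infer_crypto_protocol_alt]
  rw [getD_eq_pvPrio, getD_eq_pvPrio, minP, contains_pair, contains_pair]
  rw [show PySem.Set.ofList [(443 : Int), 465, 636, 853, 993, 995, 8443, 9443, 6443, 2376]
        = PySem.Set.ofList pvTlsL from rfl, inter_pair]
  generalize (lp.getD 0) = x
  generalize (rp.getD 0) = y
  generalize (PySem.Str.lower (pn.getD "")) = nm
  by_cases h22 : x = 22 ∨ y = 22 <;>
    by_cases h518 : x = 51820 ∨ y = 51820 <;>
      by_cases htls : x ∈ pvTlsL ∨ y ∈ pvTlsL <;>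
        simp only [h22, h518, htls, decide_true, decide_false, if_true, if_false,
                   Bool.true_or, Bool.false_or,
                   pvNameRules, pvFirstMatch, List.any_cons, List.any_nil, Bool.or_false] <;>
        · generalize PySem.Str.isIn "ssh" nm = b1
          generalize PySem.Str.isIn "wireguard" nm = b2
          generalize PySem.Str.startswith nm "wg" = b3
          generalize PySem.Str.isIn "nginx" nm = b4
          generalize PySem.Str.isIn "haproxy" nm = b5
          generalize PySem.Str.isIn "curl" nm = b6
          generalize PySem.Str.isIn "wget" nm = b7
          generalize PySem.Str.isIn "openssl" nm = b8
          generalize PySem.Str.isIn "stunnel" nm = b9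
          generalize PySem.Str.isIn "traefik" nm = b10
          revert b1 b2 b3 b4 b5 b6 b7 b8 b9 b10
          decide

-- ===== VERDICT (by name: the statement is the Claim_ definition above) =====
theorem infer_crypto_protocol_spec : Claim_equal_infer_crypto_protocol := by
  intro lp rp pn _
  unfold Spec_infer_crypto_protocol
  exact key_lemma lp rp pn
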